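-- pv_equiv track=rewrite | github.com/KirilBourakov/PestoFish2 | builders/network/CNN/transformer.py | transform
-- ===== SOURCE A (Python) =====
-- def transform(fen_board, color_to_move):
--     '''Turns data from fen, to board representaion, to bitboard (8x8x6):
--
--     Row
--         [
--            Col
--            [
--                 Piece
--                 [-1, 0, 0, 0, 0 ... 0],
--                 [0, 0, 0, 0, 1 ... 0],
--                 ...
--                 [0, 0, 0, 0, 1 ... 0],
--            ],
--            [
--                 [-1, 0, 0, 0, 0 ... 0],
--                 [-1, 0, 0, 0, 0 ... 0],
--                 ...
--                 [-1, 0, 0, 0, 0 ... 0],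
--            ]
--         ]
--     '''
--     final_board = []
--     for i in range(8):
--         final_board.append([])
--     for i in range(8):
--         for j in range(8):
--             final_board[i].append([0]*6)
--
--     index = {
--         'k': 0,
--         'q': 1,
--         'r': 2,
--         'b': 3,
--         'n': 4,
--         'p': 5
--     }
--     fen_board = fen_board.split('/')
--     for y,row in enumerate(fen_board):
--         x_fen_index = 0
--         x_true_index = 0
--         while x_true_index < 8:
--             letter = row[x_fen_index]
--             if letter.isdigit():
--                 x_true_index += int(letter)
--                 x_fen_index += 1
--                 continue
--
--             white = 1 if color_to_move == "w" else -1
--             if letter.islower():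
--                 final_board[y][x_true_index][index[letter]] = white * -1
--             else:
--                 final_board[y][x_true_index][index[letter.lower()]] = white
--             x_true_index += 1
--             x_fen_index += 1
--
--     return final_board
-- ===== SOURCE B (Python) =====
-- def transform(fen_board, color_to_move):
--     index = {'k': 0, 'q': 1, 'r': 2, 'b': 3, 'n': 4, 'p': 5}
--     white = 1 if color_to_move == "w" else -1
--
--     def square(ch):
--         vec = [0] * 6
--         if ch != ' ':
--             vec[index[ch.lower()]] = -white if ch.islower() else white
--         return vec
--
--     def rank(row):
--         expanded = ''.join(' ' * int(c) if c.isdigit() else c for c in row)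
--         return [square(expanded[x]) for x in range(8)]
--
--     ranks = [rank(row) for row in fen_board.split('/')[:8]]
--     empty_rank = [[0] * 6 for _ in range(8)]
--     return ranks + [list(empty_rank) for _ in range(8 - len(ranks))]
-- ===== Notes on version B (the rewrite author's own statement) =====
-- stated objective: alternative
-- what changed: A mutates a pre-built 8x8x6 zero tensor with a dual-pointer while loop (FEN index vs board column, continue-driven); B builds the result functionally: each FEN rank is expanded into a flat layout by replacing every digit with that many blanks, each of the 8 squares is then mapped independently to its 6-vector, and missing ranks are padded with empty ranks. Pre_ excludes exactly the inputs on which A raises (a rank narrower than 8 columns: IndexError; an unknown piece letter read before column 8: KeyError; a piece placed in rank 9+: IndexError).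
import Mathlib
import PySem

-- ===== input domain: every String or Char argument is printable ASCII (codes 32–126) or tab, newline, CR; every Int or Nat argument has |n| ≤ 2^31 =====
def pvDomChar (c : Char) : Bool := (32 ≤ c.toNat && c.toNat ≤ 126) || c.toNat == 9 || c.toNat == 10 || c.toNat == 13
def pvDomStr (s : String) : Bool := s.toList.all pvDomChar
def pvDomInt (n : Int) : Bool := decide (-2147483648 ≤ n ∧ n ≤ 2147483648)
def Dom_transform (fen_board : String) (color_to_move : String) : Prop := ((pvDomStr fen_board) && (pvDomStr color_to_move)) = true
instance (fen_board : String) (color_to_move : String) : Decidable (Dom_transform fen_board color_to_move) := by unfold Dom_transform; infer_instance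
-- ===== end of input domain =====

-- B builds the board functionally (expand digits to blanks, map each square, pad missing ranks)
-- instead of A's dual-pointer mutation loop; return values agree on Pre_.

-- the dict {'k':0,'q':1,'r':2,'b':3,'n':4,'p':5}; none = KeyError
def pieceIdx? (c : Char) : Option Nat :=
  if c = 'k' then some 0 else if c = 'q' then some 1 else if c = 'r' then some 2
  else if c = 'b' then some 3 else if c = 'n' then some 4 else if c = 'p' then some 5 else none

-- ===== PORT A =====
-- the assignment final_board[y][x][k] = v
def set3 (b : List (List (List Int))) (y x k : Nat) (v : Int) : List (List (List Int)) :=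
  b.modify y (fun row => row.modify x (fun cell => cell.set k v))

-- A's while loop over one row: x_fen_index walks the row (structural recursion on the remaining
-- suffix), x_true_index is the board column.  Where Python raises (row exhausted with
-- x_true_index < 8: IndexError; unknown letter: KeyError) the port returns the board unchanged —
-- those inputs are excluded by Pre_.  int(letter) for an ASCII digit is letter.toNat - 48 (exact).
def loopA (cm : String) (y : Nat) : List (List (List Int)) → List Char → Nat → List (List (List Int))
  | board, rest, xt =>
    if 8 ≤ xt then board
    else
      match rest with
      | [] => board  -- IndexError (excluded by Pre_)
      | c :: r =>
        if PySem.Chars.isdigit c then loopA cm y board r (xt + (c.toNat - 48))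
        else
          let white : Int := if cm = "w" then 1 else -1
          if PySem.Chars.islower c then
            match pieceIdx? c with
            | none => board  -- KeyError (excluded by Pre_)
            | some k => loopA cm y (set3 board y xt k (white * -1)) r (xt + 1)
          else
            match pieceIdx? (PySem.Chars.lowerChar c) with
            | none => board  -- KeyError (excluded by Pre_)
            | some k => loopA cm y (set3 board y xt k white) r (xt + 1)

-- for y, row in enumerate(fen_board):
def rowsA (cm : String) : List (List Char) → Nat → List (List (List Int)) → List (List (List Int))
  | [], _, board => board
  | r :: rs, y, board => rowsA cm rs (y + 1) (loopA cm y board r 0)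

def transform (fen_board : String) (color_to_move : String) : List (List (List Int)) :=
  let f0 := (List.range 8).foldl (fun b _ => b ++ [([] : List (List Int))]) []
  let f1 := (List.range 8).foldl
    (fun b i => (List.range 8).foldl (fun b _ => b.modify i (fun row => row ++ [List.replicate 6 (0 : Int)])) b) f0
  rowsA color_to_move (PySem.Chars.splitOn fen_board.toList ['/']) 0 f1

-- ===== PORT B =====
-- expanded = ''.join(' ' * int(c) if c.isdigit() else c for c in row)
def expandRow (row : List Char) : List Char :=
  row.flatMap (fun c => if PySem.Chars.isdigit c then List.replicate (c.toNat - 48) ' ' else [c])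

-- square(ch): the 6-vector of one board square (KeyError on an unknown letter: excluded by Pre_)
def squareB (white : Int) (ch : Char) : List Int :=
  if ch = ' ' then List.replicate 6 0
  else
    match pieceIdx? (PySem.Chars.lowerChar ch) with
    | none => List.replicate 6 0  -- KeyError (excluded by Pre_)
    | some k => (List.replicate 6 (0 : Int)).set k (if PySem.Chars.islower ch then -white else white)

-- rank(row) = [square(expanded[x]) for x in range(8)] (expanded[x] IndexError: excluded by Pre_)
def rankB (white : Int) (row : List Char) : List (List Int) :=
  (PySem.List.pyRange 0 8 1).map (fun x =>
    match PySem.List.pyGet? (expandRow row) x with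
    | none => List.replicate 6 0  -- IndexError (excluded by Pre_)
    | some ch => squareB white ch)

def transform_alt (fen_board : String) (color_to_move : String) : List (List (List Int)) :=
  let white : Int := if color_to_move = "w" then 1 else -1
  let ranks := ((PySem.Chars.splitOn fen_board.toList ['/']).take 8).map (rankB white)
  ranks ++ List.replicate (8 - ranks.length) (List.replicate 8 (List.replicate 6 (0 : Int)))

-- ===== PRECONDITION & SPEC =====
-- column width of a FEN character: a digit advances the column by its value, anything else by 1
def cw (c : Char) : Nat := if PySem.Chars.isdigit c then c.toNat - 48 else 1

-- Pre_ is exactly the set of inputs on which the Python A returns normally (no exception):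
-- in each '/'-separated row, the character widths must sum to at least 8 (a shorter row is an
-- IndexError), and every non-digit character that starts before column 8 (only those are read as
-- pieces) must be a valid piece letter (else KeyError) and must lie in one of the first 8 rows
-- (a placement into row 9+ is an IndexError).
def Pre_transform (fen_board : String) (color_to_move : String) : Prop :=
  ∀ y, (hy : y < (PySem.Chars.splitOn fen_board.toList ['/']).length) →
    8 ≤ (((PySem.Chars.splitOn fen_board.toList ['/'])[y]).map cw).sum ∧
    ∀ i, (hi : i < ((PySem.Chars.splitOn fen_board.toList ['/'])[y]).length) →
      ((((PySem.Chars.splitOn fen_board.toList ['/'])[y]).take i).map cw).sum < 8 →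
      PySem.Chars.isdigit (((PySem.Chars.splitOn fen_board.toList ['/'])[y])[i]) = false →
      y < 8 ∧ (pieceIdx? (PySem.Chars.lowerChar (((PySem.Chars.splitOn fen_board.toList ['/'])[y])[i]))).isSome = true

instance (fen_board : String) (color_to_move : String) : Decidable (Pre_transform fen_board color_to_move) := by
  unfold Pre_transform; infer_instance

def pvWitness_transform : String × String := ("rnbqkbnr/pppppppp/8/8/8/8/PPPPPPPP/RNBQKBNR", "w")

def Spec_transform (fen_board : String) (color_to_move : String) (out : List (List (List Int))) : Prop :=
  out = transform_alt fen_board color_to_move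
instance (fen_board : String) (color_to_move : String) (out : List (List (List Int))) : Decidable (Spec_transform fen_board color_to_move out) := by
  unfold Spec_transform; infer_instance

-- ===== CLAIM (what is proved, stated in full; the proofs are below) =====
def Claim_equal_transform : Prop := ∀ (fen_board : String) (color_to_move : String), Dom_transform fen_board color_to_move → Pre_transform fen_board color_to_move → Spec_transform fen_board color_to_move (transform fen_board color_to_move)

-- ===== LEMMAS AND PROOFS =====

-- proof-internal invariant: A's scan of a row suffix from column xt terminates normally
def rowOk (allow : Bool) : List Char → Nat → Bool
  | [], xt => decide (8 ≤ xt)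
  | c :: r, xt =>
    if 8 ≤ xt then true
    else if PySem.Chars.isdigit c then rowOk allow r (xt + (c.toNat - 48))
    else allow && (pieceIdx? (PySem.Chars.lowerChar c)).isSome && rowOk allow r (xt + 1)

lemma rowOk_of_pre (a : Bool) (rest : List Char) : ∀ (xt : Nat),
    8 ≤ xt + (rest.map cw).sum →
    (∀ i, (hi : i < rest.length) → xt + ((rest.take i).map cw).sum < 8 →
      PySem.Chars.isdigit rest[i] = false →
      a = true ∧ (pieceIdx? (PySem.Chars.lowerChar rest[i])).isSome = true) →
    rowOk a rest xt = true := by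
  induction rest with
  | nil => intro xt h1 _; simp at h1; simp [rowOk, h1]
  | cons c r ih =>
    intro xt h1 h2
    by_cases h8 : 8 ≤ xt
    · simp [rowOk, h8]
    · by_cases hd : PySem.Chars.isdigit c
      · simp only [rowOk, if_neg h8, if_pos hd]
        apply ih
        · simp only [List.map_cons, List.sum_cons, cw, if_pos hd] at h1; omega
        · intro i hi hcol hdig
          have := h2 (i + 1) (by simpa using hi)
            (by simp only [List.take_succ_cons, List.map_cons, List.sum_cons, cw, if_pos hd]; omega)
            (by simpa using hdig)
          simpa using this
      · simp only [rowOk, if_neg h8, if_neg hd, Bool.and_eq_true]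
        have h0 := h2 0 (by simp) (by simpa using lt_of_not_ge h8) (by simpa using eq_false_of_ne_true hd)
        simp only [List.getElem_cons_zero] at h0
        refine ⟨⟨h0.1, h0.2⟩, ?_⟩
        apply ih
        · simp only [List.map_cons, List.sum_cons, cw, if_neg hd] at h1; omega
        · intro i hi hcol hdig
          have := h2 (i + 1) (by simpa using hi)
            (by simp only [List.take_succ_cons, List.map_cons, List.sum_cons, cw, if_neg hd]; omega)
            (by simpa using hdig)
          simpa using this

lemma lowerChar_of_islower (c : Char) (h : PySem.Chars.islower c = true) : PySem.Chars.lowerChar c = c := by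
  simp [PySem.Chars.islower, Char.le_def, UInt32.le_iff_toNat_le] at h
  rw [PySem.Chars.lowerChar, if_neg]
  simp [PySem.Chars.isupper, Char.le_def, UInt32.le_iff_toNat_le]
  omega

-- A's row loop, restricted to the single row it actually touches
def loopRow (white : Int) : List (List Int) → List Char → Nat → List (List Int)
  | r, rest, xt =>
    if 8 ≤ xt then r
    else
      match rest with
      | [] => r
      | c :: t =>
        if PySem.Chars.isdigit c then loopRow white r t (xt + (c.toNat - 48))
        else
          match pieceIdx? (PySem.Chars.lowerChar c) with
          | none => r
          | some k =>
            loopRow white (r.modify xt (fun cell => cell.set k (if PySem.Chars.islower c then -white else white))) t (xt + 1)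

lemma modify_modify {α : Type} (l : List α) (i : Nat) (f g : α → α) :
    (l.modify i f).modify i g = l.modify i (fun x => g (f x)) := by
  apply List.ext_getElem (by simp)
  intro j h1 h2
  simp only [List.getElem_modify]
  split_ifs <;> rfl

-- step equations for loopRow (rw-able under binders)
lemma loopRow_nil (w : Int) (r : List (List Int)) (xt : Nat) : loopRow w r [] xt = r := by
  rw [loopRow.eq_def]; simp

lemma modify_id' {α : Type} (i : Nat) (l : List α) : l.modify i (fun x => x) = l :=
  List.modify_id i l

lemma loopRow_cons (w : Int) (r : List (List Int)) (c : Char) (t : List Char) (xt : Nat) :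
    loopRow w r (c :: t) xt =
      if 8 ≤ xt then r
      else if PySem.Chars.isdigit c then loopRow w r t (xt + (c.toNat - 48))
      else
        match pieceIdx? (PySem.Chars.lowerChar c) with
        | none => r
        | some k =>
          loopRow w (r.modify xt (fun cell => cell.set k (if PySem.Chars.islower c then -w else w))) t (xt + 1) := by
  rw [loopRow.eq_def]

-- A's loop only touches row y of the board
lemma loopA_eq_modify (cm : String) (y : Nat) (rest : List Char) : ∀ (xt : Nat) (board : List (List (List Int))),
    loopA cm y board rest xt =
      board.modify y (fun r => loopRow (if cm = "w" then 1 else -1) r rest xt) := by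
  induction rest with
  | nil =>
    intro xt board
    rw [loopA]
    simp [loopRow_nil, modify_id']
  | cons c t ih =>
    intro xt board
    rw [loopA]
    by_cases h8 : 8 ≤ xt
    · simp [loopRow_cons, h8, modify_id']
    · by_cases hd : PySem.Chars.isdigit c
      · simp only [loopRow_cons, if_neg h8, if_pos hd]
        exact ih _ _
      · by_cases hl : PySem.Chars.islower c
        · cases hk : pieceIdx? c with
          | none =>
            simp [loopRow_cons, h8, hd, hl, lowerChar_of_islower c hl, hk, modify_id']
          | some k =>
            simp only [loopRow_cons, if_neg h8, if_neg hd, lowerChar_of_islower c hl, hk,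
              if_pos hl]
            rw [ih]
            unfold set3
            rw [modify_modify]
            simp only [(by ring :
              (if cm = "w" then (1:Int) else -1) * -1 = -(if cm = "w" then (1:Int) else -1))]
        · cases hk : pieceIdx? (PySem.Chars.lowerChar c) with
          | none =>
            simp [loopRow_cons, h8, hd, hl, hk, modify_id']
          | some k =>
            simp only [loopRow_cons, if_neg h8, if_neg hd, if_neg hl, hk]
            rw [ih]
            unfold set3
            rw [modify_modify]

lemma squareB_space (w : Int) : squareB w ' ' = List.replicate 6 0 := by simp [squareB]

-- core: A's row loop on a row whose untouched tail is zeros writes exactly B's squares of the expansion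
lemma loopRow_eq (w : Int) (rest : List Char) : ∀ (xt : Nat) (r : List (List Int)),
    r.length = 8 →
    r.drop xt = List.replicate (8 - xt) (List.replicate 6 0) →
    rowOk true rest xt = true →
    loopRow w r rest xt = r.take xt ++ ((expandRow rest).take (8 - xt)).map (squareB w) := by
  induction rest with
  | nil =>
    intro xt r hlen hdrop hok
    simp [rowOk] at hok
    rw [loopRow]
    simp [hok, expandRow, List.take_of_length_le (le_trans (le_of_eq hlen) hok)]
  | cons c t ih =>
    intro xt r hlen hdrop hok
    rw [loopRow]
    by_cases h8 : 8 ≤ xt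
    · have : (8 : Nat) - xt = 0 := by omega
      simp [h8, this, List.take_of_length_le (le_trans (le_of_eq hlen) h8)]
    · simp only [if_neg h8]
      by_cases hd : PySem.Chars.isdigit c
      · simp only [rowOk, if_neg h8, if_pos hd] at hok
        simp only [if_pos hd]
        rw [ih (xt + (c.toNat - 48)) r hlen ?_ hok]
        · have hexp : expandRow (c :: t) = List.replicate (c.toNat - 48) ' ' ++ expandRow t := by
            simp [expandRow, if_pos hd]
          have htake : r.take (xt + (c.toNat - 48)) =
              r.take xt ++ List.replicate (min (c.toNat - 48) (8 - xt)) (List.replicate 6 0) := by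
            rw [List.take_add, hdrop, List.take_replicate]
          rw [hexp, List.take_append, List.map_append, List.take_replicate, List.map_replicate,
              squareB_space, List.length_replicate, htake, List.append_assoc]
          congr 2
          · congr 1; omega
          · congr 2; omega
        · rw [← List.drop_drop, hdrop, List.drop_replicate]
          congr 1; omega
      · simp only [rowOk, if_neg h8, if_neg hd, Bool.and_eq_true] at hok
        obtain ⟨⟨-, hks⟩, hok⟩ := hok
        obtain ⟨k, hk⟩ := Option.isSome_iff_exists.mp hks
        simp only [if_neg hd, hk]
        have hxt : xt < 8 := by omega
        have hxtr : xt < r.length := by omega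
        -- the cell being written is still zeros
        have hcell : r[xt]? = some (List.replicate 6 0) := by
          have h0 : (r.drop xt)[0]? = (List.replicate (8 - xt) (List.replicate 6 (0:Int)))[0]? := by
            rw [hdrop]
          rw [List.getElem?_drop] at h0
          simpa [List.getElem?_replicate, (by omega : 0 < 8 - xt)] using h0
        set v : List Int := (List.replicate 6 (0:Int)).set k (if PySem.Chars.islower c then -w else w) with hv
        have hmod : r.modify xt (fun cell => cell.set k (if PySem.Chars.islower c then -w else w)) =
            r.set xt v := by
          rw [List.modify_eq_set_getElem?, hcell]
          rfl
        rw [hmod]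
        rw [ih (xt + 1) (r.set xt v) (by simpa using hlen) ?_ hok]
        · have hcne : c ≠ ' ' := by
            intro h
            rw [h, (by decide : pieceIdx? (PySem.Chars.lowerChar ' ') = none)] at hk
            cases hk
          have hsq : squareB w c = v := by
            simp [squareB, hcne, hk, hv]
          have hexp : expandRow (c :: t) = c :: expandRow t := by
            simp [expandRow, if_neg hd]
          rw [hexp]
          have h81 : 8 - xt = (8 - (xt+1)) + 1 := by omega
          rw [h81, List.take_succ_cons, List.map_cons, hsq]
          have hdropset : (r.set xt v).drop xt = v :: List.replicate (8 - (xt + 1)) (List.replicate 6 0) := by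
            rw [List.drop_set, if_neg (lt_irrefl xt), Nat.sub_self, hdrop,
                (by omega : 8 - xt = (8 - (xt + 1)) + 1), List.replicate_succ, List.set_cons_zero]
          have htake1 : (r.set xt v).take (xt + 1) = r.take xt ++ [v] := by
            rw [List.take_add, hdropset, List.take_succ_cons, List.take_zero, List.take_set,
                List.set_eq_of_length_le (by simpa using Nat.min_le_left xt r.length)]
          rw [htake1, List.append_assoc]
          rfl
        · rw [List.drop_set, if_pos (by omega), ← List.drop_drop, hdrop, List.drop_replicate]
          exact congrArg (fun n => List.replicate n (List.replicate 6 (0:Int))) (by omega)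

lemma expandRow_length (row : List Char) : (expandRow row).length = (row.map cw).sum := by
  induction row with
  | nil => simp [expandRow]
  | cons c t ih =>
    by_cases hd : PySem.Chars.isdigit c <;>
      simp [expandRow, cw, hd] at ih ⊢ <;> omega

-- B's rank is the mapped 8-prefix of the expansion
lemma rankB_eq_take (w : Int) (row : List Char) (h8 : 8 ≤ (expandRow row).length) :
    rankB w row = ((expandRow row).take 8).map (squareB w) := by
  unfold rankB
  have hr : PySem.List.pyRange 0 8 1 = (List.range 8).map (fun k : Nat => (k : Int)) := by decide
  rw [hr, List.map_map]
  have : ∀ n, n ≤ (expandRow row).length →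
      (List.range n).map (fun k : Nat =>
        (match PySem.List.pyGet? (expandRow row) ((k : Int)) with
          | none => List.replicate 6 0
          | some ch => squareB w ch)) = ((expandRow row).take n).map (squareB w) := by
    intro n hn
    induction n with
    | zero => simp
    | succ m ihm =>
      rw [List.range_succ, List.map_append, ihm (by omega)]
      have hm : m < (expandRow row).length := by omega
      rw [List.take_succ, List.map_append]
      congr 1
      simp [PySem.List.pyGet?_natCast, List.getElem?_eq_getElem hm]
  exact this 8 h8

-- zero rank
lemma loopRow_rank (cm : String) (row : List Char)
    (hok : rowOk true row 0 = true) (h8 : 8 ≤ (row.map cw).sum) :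
    loopRow (if cm = "w" then 1 else -1) (List.replicate 8 (List.replicate 6 0)) row 0 =
      rankB (if cm = "w" then 1 else -1) row := by
  rw [loopRow_eq _ row 0 _ (by simp) (by simp) hok,
      rankB_eq_take _ row (by rw [expandRow_length]; omega)]
  simp

-- board-level induction
lemma rows_eq (cm : String) (rows : List (List Char)) : ∀ (y : Nat) (board : List (List (List Int))),
    board.length = 8 →
    board.drop y = List.replicate (8 - y) (List.replicate 8 (List.replicate 6 0)) →
    (∀ j, (hj : j < rows.length) →
      8 ≤ ((rows[j]).map cw).sum ∧
      ∀ i, (hi : i < (rows[j]).length) → (((rows[j]).take i).map cw).sum < 8 →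
        PySem.Chars.isdigit ((rows[j])[i]) = false →
        y + j < 8 ∧ (pieceIdx? (PySem.Chars.lowerChar ((rows[j])[i]))).isSome = true) →
    rowsA cm rows y board =
      board.take y ++ (rows.take (8 - y)).map (rankB (if cm = "w" then 1 else -1))
        ++ List.replicate ((8 - y) - rows.length) (List.replicate 8 (List.replicate 6 0)) := by
  induction rows with
  | nil =>
    intro y board hlen hdrop _
    simp only [rowsA, List.take_nil, List.map_nil, List.length_nil, Nat.sub_zero, List.append_nil]
    rw [← hdrop, List.take_append_drop]
  | cons r rs ih =>
    intro y board hlen hdrop hpre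
    have h0 := hpre 0 (by simp)
    simp only [List.getElem_cons_zero, Nat.add_zero] at h0
    rw [rowsA, loopA_eq_modify]
    by_cases hy : y < 8
    · -- the touched row is still the zero rank
      have hyr : y < board.length := by omega
      have hrow : board[y]? = some (List.replicate 8 (List.replicate 6 0)) := by
        have h0 : (board.drop y)[0]? = (List.replicate (8 - y) (List.replicate 8 (List.replicate 6 (0:Int))))[0]? := by
          rw [hdrop]
        rw [List.getElem?_drop] at h0
        simpa [List.getElem?_replicate, (by omega : 0 < 8 - y)] using h0
      have hok : rowOk true r 0 = true := by
        apply rowOk_of_pre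
        · simpa using h0.1
        · intro i hi hcol hdig
          have h' := h0.2 i hi (by simpa using hcol) hdig
          exact ⟨rfl, h'.2⟩
      have hmod : board.modify y (fun rr => loopRow (if cm = "w" then 1 else -1) rr r 0) =
          board.set y (rankB (if cm = "w" then 1 else -1) r) := by
        rw [List.modify_eq_set_getElem?, hrow]
        show board.set y (loopRow (if cm = "w" then 1 else -1) (List.replicate 8 (List.replicate 6 0)) r 0) = _
        rw [loopRow_rank cm r hok h0.1]
      rw [hmod]
      have hdrop' : (board.set y (rankB (if cm = "w" then 1 else -1) r)).drop (y + 1) =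
          List.replicate (8 - (y + 1)) (List.replicate 8 (List.replicate 6 0)) := by
        rw [List.drop_set, if_pos (Nat.lt_succ_self y), ← List.drop_drop, hdrop, List.drop_replicate]
        exact congrArg (fun n => List.replicate n (List.replicate 8 (List.replicate 6 (0:Int)))) (by omega)
      have hpre' : ∀ j, (hj : j < rs.length) →
          8 ≤ ((rs[j]).map cw).sum ∧
          ∀ i, (hi : i < (rs[j]).length) → (((rs[j]).take i).map cw).sum < 8 →
            PySem.Chars.isdigit ((rs[j])[i]) = false →
            (y + 1) + j < 8 ∧ (pieceIdx? (PySem.Chars.lowerChar ((rs[j])[i]))).isSome = true := by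
        intro j hj
        have h' := hpre (j + 1) (by simpa using hj)
        simp only [List.getElem_cons_succ] at h'
        refine ⟨h'.1, ?_⟩
        intro i hi hcol hdig
        have h'' := h'.2 i hi hcol hdig
        exact ⟨by omega, h''.2⟩
      rw [ih (y + 1) _ (by simpa using hlen) hdrop' hpre']
      have hdropset : (board.set y (rankB (if cm = "w" then 1 else -1) r)).drop y =
          rankB (if cm = "w" then 1 else -1) r
            :: List.replicate (8 - (y + 1)) (List.replicate 8 (List.replicate 6 0)) := by
        rw [List.drop_set, if_neg (lt_irrefl y), Nat.sub_self, hdrop,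
            (by omega : 8 - y = (8 - (y + 1)) + 1), List.replicate_succ, List.set_cons_zero]
      have htake1 : (board.set y (rankB (if cm = "w" then 1 else -1) r)).take (y + 1) =
          board.take y ++ [rankB (if cm = "w" then 1 else -1) r] := by
        rw [List.take_add, hdropset, List.take_succ_cons, List.take_zero, List.take_set,
            List.set_eq_of_length_le (by simpa using Nat.min_le_left y board.length)]
      rw [htake1]
      have h2 : 8 - y - (r :: rs).length = 8 - (y + 1) - rs.length := by
        simp only [List.length_cons]; omega
      rw [h2, (by omega : 8 - y = (8 - (y + 1)) + 1), List.take_succ_cons, List.map_cons]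
      simp [List.append_assoc]
    · -- y ≥ 8: modify is out of range, the row list beyond 8 is exhausted
      have hmod : board.modify y (fun rr => loopRow (if cm = "w" then 1 else -1) rr r 0) = board := by
        exact List.modify_eq_self (by omega)
      rw [hmod]
      rw [ih (y + 1) board hlen ?_ ?_]
      · have h1 : (8:Nat) - y = 0 := by omega
        have h2 : (8:Nat) - (y + 1) = 0 := by omega
        simp [h1, h2, List.take_of_length_le (by omega : board.length ≤ y),
              List.take_of_length_le (by omega : board.length ≤ y + 1)]
      · have h2 : (8:Nat) - (y + 1) = 0 := by omega
        rw [h2, List.drop_eq_nil_of_le (by omega)]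
        simp
      · intro j hj
        have h' := hpre (j + 1) (by simpa using hj)
        simp only [List.getElem_cons_succ] at h'
        refine ⟨h'.1, ?_⟩
        intro i hi hcol hdig
        have h'' := h'.2 i hi hcol hdig
        exact ⟨by omega, h''.2⟩

-- ===== VERDICT (by name: the statement is the Claim_ definition above) =====
theorem transform_spec : Claim_equal_transform := by
  intro fen cm _ hpre
  unfold Spec_transform transform transform_alt
  have hinit : (List.range 8).foldl
      (fun b i => (List.range 8).foldl (fun b _ => b.modify i (fun row => row ++ [List.replicate 6 (0 : Int)])) b)
      ((List.range 8).foldl (fun b _ => b ++ [([] : List (List Int))]) []) =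
      List.replicate 8 (List.replicate 8 (List.replicate 6 (0 : Int))) := by decide
  simp only [hinit]
  rw [rows_eq cm _ 0 _ (by simp) (by simp) ?_]
  · simp only [List.take_nil, Nat.sub_zero, List.nil_append, List.length_map, List.length_take]
    congr 2
    omega
  · intro j hj
    have := hpre j hj
    refine ⟨this.1, ?_⟩
    intro i hi hcol hdig
    have h' := this.2 i hi hcol hdig
    exact ⟨by omega, h'.2⟩
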